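-- pv_equiv track=rewrite | github.com/SeraphWedd/CodeChef_Codes-Python-3.x- | beginner/MOVIEWKN.py | evaluate
-- ===== SOURCE A (Python) =====
-- def evaluate(l, r, n):
--     temp = [0 for x in l]
--     for i in range(n):
--         temp[i] = l[i]*r[i]
--     mx = max(temp)
--     if temp.count(mx) == 1:
--         return temp.index(mx) + 1
--     else:
--         ind = []
--         for i in range(n):
--             if temp[i] == mx:
--                 ind.append(i)
--         curr = 0
--         ans = 0
--         for i in ind:
--             if curr < r[i]:
--                 ans = i
--                 curr = r[i]
--         return ans + 1
-- ===== SOURCE B (Python) =====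
-- def evaluate(l, r, n):
--     best = 0
--     for i in range(1, n):
--         if (l[i] * r[i], r[i]) > (l[best] * r[best], r[best]):
--             best = i
--     return best + 1
-- ===== Notes on version B (the rewrite author's own statement) =====
-- stated objective: simpler
-- what changed: A builds a zero-padded product table over all of l and then runs four separate scans over it (max, count, index, an explicit tie loop); B is a single running-best pass over the n movies keyed lexicographically by (product, rating). Pre_ excludes the inputs where A raises (empty l, or 1 <= n exceeding a list length) and the degenerate corners outside the task's contract (n = len(l) = len(r), positive ratings) where A's winner comes from its unfilled zero slots or its zero-seeded tie loop.
-- outside the precondition, e.g. on evaluate([-1, 2, 2], [1, 0, 0], 3): A returns 1, B returns 2; on evaluate([1, -1], [-1, -1], 1): A returns 2, B returns 1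
import Mathlib
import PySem

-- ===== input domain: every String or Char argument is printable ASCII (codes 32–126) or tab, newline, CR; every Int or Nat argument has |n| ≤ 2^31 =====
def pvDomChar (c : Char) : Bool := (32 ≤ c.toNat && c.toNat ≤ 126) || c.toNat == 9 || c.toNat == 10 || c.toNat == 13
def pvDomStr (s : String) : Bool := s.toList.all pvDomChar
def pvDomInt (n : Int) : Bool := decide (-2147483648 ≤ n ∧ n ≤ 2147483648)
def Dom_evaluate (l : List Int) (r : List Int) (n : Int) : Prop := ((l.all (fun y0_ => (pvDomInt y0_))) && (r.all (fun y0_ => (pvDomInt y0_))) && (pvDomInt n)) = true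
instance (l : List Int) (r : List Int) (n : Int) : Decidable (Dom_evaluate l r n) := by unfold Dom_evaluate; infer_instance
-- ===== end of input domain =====

-- B replaces A's build-a-padded-table-then-four-scans structure (max, count, index,
-- explicit tie loop) by a single running-best pass keyed by (product, rating);
-- equal on Pre_ (see the comment above Pre_evaluate for what it excludes and why).

-- ===== PORT A =====
def evaluate (l : List Int) (r : List Int) (n : Int) : Int :=
  let temp0 := l.map (fun _ => (0:Int))
  let temp := (PySem.List.pyRange 0 n 1).foldl
      (fun t i => PySem.List.pySetD t i (PySem.List.pyGetD l i 0 * PySem.List.pyGetD r i 0)) temp0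
  let mx := (PySem.List.max? temp (fun x => x)).getD 0   -- max([]) raises ValueError; Pre_evaluate excludes l = []
  if PySem.List.count temp mx = 1 then
    ((PySem.List.index? temp mx).getD 0 : Int) + 1
  else
    let ind := (PySem.List.pyRange 0 n 1).foldl
        (fun acc i => if PySem.List.pyGetD temp i 0 = mx then acc ++ [i] else acc) ([] : List Int)
    let p := ind.foldl
        (fun (p : Int × Int) i =>
          if p.1 < PySem.List.pyGetD r i 0 then (PySem.List.pyGetD r i 0, i) else p)
        ((0:Int), (0:Int))
    p.2 + 1

-- ===== PORT B =====
def evaluate_alt (l : List Int) (r : List Int) (n : Int) : Int :=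
  ((PySem.List.pyRange 1 n 1).foldl
    (fun best i =>
      if PySem.List.pyGetD l best 0 * PySem.List.pyGetD r best 0 <
           PySem.List.pyGetD l i 0 * PySem.List.pyGetD r i 0
         ∨ (PySem.List.pyGetD l i 0 * PySem.List.pyGetD r i 0 =
              PySem.List.pyGetD l best 0 * PySem.List.pyGetD r best 0
            ∧ PySem.List.pyGetD r best 0 < PySem.List.pyGetD r i 0)
      then i else best) (0 : Int)) + 1

-- ===== PRECONDITION & SPEC =====
-- closed-form data about the input used by Pre_: products of the first n movies,
-- their maximum, the tied argmax indices, the best rating there, the first such index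
def dP (l r : List Int) (i : Nat) : Int := l.getD i 0 * r.getD i 0
def dProds (l r : List Int) (n : Int) : List Int := (List.range n.toNat).map (dP l r)
def dMx (l r : List Int) (n : Int) : Int := (dProds l r n).max?.getD 0
def dT (l r : List Int) (n : Int) : List Nat :=
  (List.range n.toNat).filter (fun i => decide (dP l r i = dMx l r n))
def dMr (l r : List Int) (n : Int) : Int :=
  ((dT l r n).map (fun i => r.getD i 0)).max?.getD 0
def dPick (l r : List Int) (n : Int) : Nat :=
  ((dT l r n).filter (fun i => decide (r.getD i 0 = dMr l r n))).headD 0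

-- Pre_ excludes the inputs where Python A raises (empty l: ValueError from max([]);
-- 1 ≤ n with n > len(l) or n > len(r): IndexError), and the degenerate corners outside
-- the task's contract (MOVIEWKN has n = len(l) = len(r) and positive ratings) where A's
-- winner is an accident of its table: n < len(l) with every real product negative (the
-- unfilled zero slots become the maximum, returning an index past n or the constant 1),
-- and ties of the maximal product in which no tied movie has positive rating and the
-- best-rated tied movie is not movie 1 (A's zero-seeded tie loop returns movie 1);
-- B returns the first product-maximal, best-rated movie on those corners.
def Pre_evaluate (l : List Int) (r : List Int) (n : Int) : Prop :=
  l ≠ [] ∧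
  (n ≤ 0 ∨
    (n ≤ (l.length : Int) ∧ n ≤ (r.length : Int) ∧
     ¬ ((n < (l.length : Int) ∧ dMx l r n < 0 ∧ ((l.length : Int) = n + 1 ∨ dPick l r n ≠ 0))
        ∨ (n < (l.length : Int) ∧ dMx l r n = 0 ∧ dMr l r n ≤ 0 ∧ dPick l r n ≠ 0)
        ∨ (((l.length : Int) ≤ n ∨ 0 < dMx l r n) ∧ 2 ≤ (dT l r n).length
           ∧ dMr l r n ≤ 0 ∧ dPick l r n ≠ 0))))
instance (l : List Int) (r : List Int) (n : Int) : Decidable (Pre_evaluate l r n) := by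
  unfold Pre_evaluate; infer_instance
def pvWitness_evaluate : List Int × List Int × Int := ([2, 3], [1, 1], 2)

def Spec_evaluate (l : List Int) (r : List Int) (n : Int) (out : Int) : Prop :=
  out = evaluate_alt l r n
instance (l : List Int) (r : List Int) (n : Int) (out : Int) : Decidable (Spec_evaluate l r n out) := by unfold Spec_evaluate; infer_instance

-- ===== CLAIM (what is proved, stated in full; the proofs are below) =====
def Claim_equal_evaluate : Prop := ∀ (l : List Int) (r : List Int) (n : Int), Dom_evaluate l r n → Pre_evaluate l r n → Spec_evaluate l r n (evaluate l r n)

-- ===== LEMMAS AND PROOFS =====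

-- padded table value at index i: l[i]*r[i] for i < n, the initial 0 beyond n
def pvT (l r : List Int) (n : Int) (i : Nat) : Int :=
  if (i : Int) < n then dP l r i else 0

-- A's tie-break fold step, at Nat indices
def tStep (r : List Int) (p : Int × Int) (i : Nat) : Int × Int :=
  if p.1 < r.getD i 0 then (r.getD i 0, (i : Int)) else p

-- B's comparison and step, at Nat indices
def bLt (l r : List Int) (b i : Nat) : Bool :=
  decide (dP l r b < dP l r i ∨ (dP l r i = dP l r b ∧ r.getD b 0 < r.getD i 0))
def bStep (l r : List Int) (b i : Nat) : Nat := if bLt l r b i then i else b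

-- ---------- A's fill loop builds the padded table ----------
lemma temp_build (l r : List Int) (m : Nat) (hm : m ≤ l.length) :
    (PySem.List.pyRange 0 (m : Int) 1).foldl
      (fun t i => PySem.List.pySetD t i (PySem.List.pyGetD l i 0 * PySem.List.pyGetD r i 0))
      (l.map (fun _ => (0:Int)))
    = (List.range l.length).map
        (fun i => if i < m then l.getD i 0 * r.getD i 0 else 0) := by
  induction m with
  | zero =>
    rw [PySem.List.pyRange_one_eq_nil (by omega)]
    simp
  | succ m ih =>
    have h0 : (0:Int) ≤ (m:Int) := by omega
    rw [show ((m + 1 : Nat) : Int) = (m : Int) + 1 by push_cast; ring,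
        PySem.List.pyRange_one_succ_right h0, List.foldl_append, ih (by omega)]
    simp only [List.foldl_cons, List.foldl_nil, PySem.List.pySetD_natCast,
      PySem.List.pyGetD_natCast]
    apply List.ext_getElem (by simp)
    intro i h1 h2
    simp only [List.length_set, List.length_map, List.length_range] at h1
    rw [List.getElem_set]
    by_cases him : m = i
    · subst him; simp [h1]
    · rw [if_neg him]
      simp only [List.getElem_map, List.getElem_range]
      have hiff : i < m ↔ i < m + 1 := by omega
      simp [hiff]

lemma temp_eq (l r : List Int) (n : Int) (hn : n ≤ (l.length : Int)) :
    (PySem.List.pyRange 0 n 1).foldl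
      (fun t i => PySem.List.pySetD t i (PySem.List.pyGetD l i 0 * PySem.List.pyGetD r i 0))
      (l.map (fun _ => (0:Int)))
    = (List.range l.length).map (pvT l r n) := by
  by_cases h0 : 0 ≤ n
  · rw [show n = (n.toNat : Int) by omega, temp_build l r n.toNat (by omega)]
    apply List.map_congr_left
    intro i hi
    have hiff : ((i : Nat) : Int) < ((n.toNat : Nat) : Int) ↔ i < n.toNat := by omega
    simp only [pvT, dP, hiff]
  · rw [PySem.List.pyRange_one_eq_nil (by omega)]
    simp only [List.foldl_nil]
    apply List.ext_getElem (by simp)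
    intro i h1 h2
    simp [pvT, show ¬ ((i:Int) < n) by omega]

-- the padded table splits into the real products and trailing zeros
lemma temp_decomp (l r : List Int) (n : Int) (hn1 : 1 ≤ n) (hnl : n ≤ (l.length : Int)) :
    (List.range l.length).map (pvT l r n)
    = dProds l r n ++ List.replicate (l.length - n.toNat) 0 := by
  have h1 : (List.range n.toNat).map (pvT l r n) = dProds l r n := by
    apply List.map_congr_left
    intro i hi
    simp only [List.mem_range] at hi
    simp [pvT, show (i:Int) < n by omega]
  have h2 : ((List.range (l.length - n.toNat)).map (fun j => n.toNat + j)).map (pvT l r n)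
      = List.replicate (l.length - n.toNat) 0 := by
    rw [List.map_map, List.eq_replicate_iff]
    refine ⟨by simp, ?_⟩
    intro b hb
    simp only [List.mem_map, List.mem_range, Function.comp] at hb
    obtain ⟨j, _, rfl⟩ := hb
    have hnj : ¬ ((n.toNat + j : Nat) : Int) < n := by push_cast; omega
    simp only [pvT]
    rw [if_neg hnj]
  conv_lhs => rw [show l.length = n.toNat + (l.length - n.toNat) from by omega]
  rw [List.range_add, List.map_append, h1, h2]

-- ---------- PySem max? with identity key, determined by its spec ----------
lemma max?_id_eq_of (xs : List Int) (c : Int) (hc : c ∈ xs) (h : ∀ y ∈ xs, y ≤ c) :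
    PySem.List.max? xs (fun x => x) = some c := by
  cases hx : PySem.List.max? xs (fun x => x) with
  | none =>
    rw [PySem.List.max?_eq_none_iff] at hx
    subst hx; simp at hc
  | some m =>
    have hm := PySem.List.max?_mem hx
    have h2 := PySem.List.max?_isMax hx
    exact congrArg some (le_antisymm (h2 c hc) (h m hm)).symm

-- ---------- facts about dMx / dT / dMr / dPick ----------
lemma dProds_ne (l r : List Int) (n : Int) (hn1 : 1 ≤ n) : dProds l r n ≠ [] := by
  simp only [dProds, ne_eq, List.map_eq_nil_iff, List.range_eq_nil]
  omega

lemma dMx_spec (l r : List Int) (n : Int) (hn1 : 1 ≤ n) :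
    dMx l r n ∈ dProds l r n ∧ ∀ b ∈ dProds l r n, b ≤ dMx l r n := by
  cases h : (dProds l r n).max? with
  | none => exact absurd (List.max?_eq_none_iff.mp h) (dProds_ne l r n hn1)
  | some a =>
    have hi := List.max?_eq_some_iff.mp h
    have h' : dMx l r n = a := by rw [dMx, h]; rfl
    rw [h']; exact hi

lemma mem_dT (l r : List Int) (n : Int) (i : Nat) :
    i ∈ dT l r n ↔ i < n.toNat ∧ dP l r i = dMx l r n := by
  simp [dT, List.mem_filter]

lemma dT_ne (l r : List Int) (n : Int) (hn1 : 1 ≤ n) : dT l r n ≠ [] := by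
  obtain ⟨hmem, -⟩ := dMx_spec l r n hn1
  simp only [dProds, List.mem_map, List.mem_range] at hmem
  obtain ⟨i, hi, hdi⟩ := hmem
  intro h
  have : i ∈ dT l r n := (mem_dT l r n i).mpr ⟨hi, hdi⟩
  simp [h] at this

lemma dT_pairwise (l r : List Int) (n : Int) : (dT l r n).Pairwise (· < ·) :=
  (List.pairwise_lt_range).filter _

lemma dMr_spec (l r : List Int) (n : Int) (hn1 : 1 ≤ n) :
    dMr l r n ∈ (dT l r n).map (fun i => r.getD i 0)
    ∧ ∀ b ∈ (dT l r n).map (fun i => r.getD i 0), b ≤ dMr l r n := by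
  cases h : ((dT l r n).map (fun i => r.getD i 0)).max? with
  | none =>
    rw [List.max?_eq_none_iff, List.map_eq_nil_iff] at h
    exact absurd h (dT_ne l r n hn1)
  | some a =>
    have hi := List.max?_eq_some_iff.mp h
    have h' : dMr l r n = a := by rw [dMr, h]; rfl
    rw [h']; exact hi

lemma headD_least {xs : List Nat} (hp : xs.Pairwise (· < ·)) (hne : xs ≠ []) :
    xs.headD 0 ∈ xs ∧ ∀ i ∈ xs, xs.headD 0 ≤ i := by
  cases xs with
  | nil => simp at hne
  | cons a t =>
    rw [List.pairwise_cons] at hp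
    refine ⟨by simp, ?_⟩
    intro i hi
    simp only [List.headD_cons]
    rcases List.mem_cons.mp hi with rfl | h
    · exact le_refl _
    · exact le_of_lt (hp.1 i h)

lemma dPick_spec (l r : List Int) (n : Int) (hn1 : 1 ≤ n) :
    dPick l r n ∈ dT l r n ∧ r.getD (dPick l r n) 0 = dMr l r n
    ∧ ∀ i ∈ dT l r n, r.getD i 0 = dMr l r n → dPick l r n ≤ i := by
  obtain ⟨hmem, -⟩ := dMr_spec l r n hn1
  simp only [List.mem_map] at hmem
  obtain ⟨p, hp, hrp⟩ := hmem
  have hmemf : p ∈ (dT l r n).filter (fun i => decide (r.getD i 0 = dMr l r n)) :=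
    List.mem_filter.mpr ⟨hp, decide_eq_true hrp⟩
  have hne : (dT l r n).filter (fun i => decide (r.getD i 0 = dMr l r n)) ≠ [] := by
    intro h; rw [h] at hmemf; exact absurd hmemf (List.not_mem_nil)
  have hpw : ((dT l r n).filter (fun i => decide (r.getD i 0 = dMr l r n))).Pairwise (· < ·) :=
    (dT_pairwise l r n).filter _
  obtain ⟨hm, hleast⟩ := headD_least hpw hne
  obtain ⟨hm1, hm2⟩ := List.mem_filter.mp hm
  refine ⟨hm1, of_decide_eq_true hm2, ?_⟩
  intro i hi hri
  exact hleast i (List.mem_filter.mpr ⟨hi, decide_eq_true hri⟩)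

-- ---------- counting values in the table ----------
lemma count_map_range (t : Nat → Int) (v : Int) (k : Nat) :
    List.count v ((List.range k).map t)
    = ((List.range k).filter (fun i => decide (t i = v))).length := by
  rw [List.count_eq_countP, List.countP_map, ← List.countP_eq_length_filter]
  apply List.countP_congr
  intro i _
  simp only [Function.comp]
  rw [show ((t i == v) : Bool) = decide (t i = v) from by
    cases h : decide (t i = v) <;> simp_all]

-- ---------- first index of a value in a mapped range ----------
lemma idxOf?_map_range (t : Nat → Int) (v : Int) (k : Nat) :
    List.idxOf? v ((List.range k).map t)
    = ((List.range k).filter (fun i => decide (t i = v))).head? := by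
  have hdef : ∀ (ys : List Int), List.idxOf? v ys = List.findIdx? (fun x => x == v) ys :=
    fun _ => rfl
  induction k with
  | zero => simp
  | succ k ih =>
    rw [List.range_succ, List.map_append, List.filter_append,
        hdef, List.findIdx?_append, ← hdef, ih, List.head?_append]
    cases h : ((List.range k).filter (fun i => decide (t i = v))).head? with
    | some j => simp
    | none =>
      by_cases hv : t k = v
      · simp [hv, List.findIdx?, List.findIdx?.go, eq_comm]
      · simp [hv, List.findIdx?, List.findIdx?.go]

-- ---------- the tie-break fold ----------
lemma t_stay (r : List Int) : ∀ (is : List Nat) (acc : Int × Int),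
    (∀ i ∈ is, r.getD i 0 ≤ acc.1) → is.foldl (tStep r) acc = acc := by
  intro is
  induction is with
  | nil => intro acc _; rfl
  | cons i tl ih =>
    intro acc h
    have hi : r.getD i 0 ≤ acc.1 := h i (by simp)
    have hst : tStep r acc i = acc := by
      unfold tStep; rw [if_neg (not_lt.mpr hi)]
    rw [List.foldl_cons, hst]
    exact ih acc (fun j hj => h j (by simp [hj]))

lemma t_go (r : List Int) : ∀ (is : List Nat) (acc : Int × Int) (mr : Int) (p : Nat),
    (∀ i ∈ is, r.getD i 0 ≤ mr) → p ∈ is → r.getD p 0 = mr →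
    (∀ i ∈ is, r.getD i 0 = mr → p ≤ i) → is.Pairwise (· < ·) → acc.1 < mr →
    is.foldl (tStep r) acc = (mr, (p : Int)) := by
  intro is
  induction is with
  | nil => intro _ _ _ _ hp; simp at hp
  | cons i tl ih =>
    intro acc mr p hle hp hrp hmin hpw hacc
    rw [List.pairwise_cons] at hpw
    rcases List.mem_cons.mp hp with rfl | hptl
    · have hst : tStep r acc p = (mr, (p:Int)) := by
        unfold tStep; rw [hrp, if_pos hacc]
      rw [List.foldl_cons, hst]
      apply t_stay r tl (mr, (p:Int))
      intro j hj
      exact hle j (by simp [hj])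
    · have hip : i < p := hpw.1 p hptl
      have hri : r.getD i 0 < mr := by
        rcases lt_or_eq_of_le (hle i (by simp)) with h | h
        · exact h
        · exact absurd (hmin i (by simp) h) (by omega)
      have hacc' : (tStep r acc i).1 < mr := by
        unfold tStep; split_ifs with h
        · simpa using hri
        · exact hacc
      rw [List.foldl_cons]
      exact ih _ mr p (fun j hj => hle j (by simp [hj])) hptl hrp
        (fun j hj hrj => hmin j (by simp [hj]) hrj) hpw.2 hacc' 

-- ---------- B's running-best fold ----------
lemma b_stay (l r : List Int) : ∀ (ks : List Nat) (b : Nat),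
    (∀ i ∈ ks, bLt l r b i = false) → ks.foldl (bStep l r) b = b := by
  intro ks
  induction ks with
  | nil => intro b _; rfl
  | cons i tl ih =>
    intro b h
    have hst : bStep l r b i = b := by simp [bStep, h i (by simp)]
    rw [List.foldl_cons, hst]
    exact ih b (fun j hj => h j (by simp [hj]))

lemma bLt_total (l r : List Int) (a b : Nat)
    (h1 : bLt l r a b = false) (h2 : bLt l r b a = false) :
    dP l r a = dP l r b ∧ r.getD a 0 = r.getD b 0 := by
  simp only [bLt, decide_eq_false_iff_not, not_or, not_and, not_lt] at h1 h2
  have hdp : dP l r a = dP l r b := le_antisymm h2.1 h1.1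
  exact ⟨hdp, le_antisymm (h2.2 hdp) (h1.2 hdp.symm)⟩

lemma b_go (l r : List Int) : ∀ (ks : List Nat) (b : Nat) (p : Nat),
    (∀ i ∈ ks, bLt l r p i = false) →
    (∀ i ∈ ks, bLt l r i p = false → p ≤ i) →
    ks.Pairwise (· < ·) →
    (bLt l r b p = true → p ∈ ks) →
    (bLt l r b p = false → p = b) →
    ks.foldl (bStep l r) b = p := by
  intro ks
  induction ks with
  | nil =>
    intro b p _ _ _ hin hout
    cases h : bLt l r b p with
    | true => exact absurd (hin h) (List.not_mem_nil)
    | false => exact (hout h).symm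
  | cons i tl ih =>
    intro b p hle hmin hpw hin hout
    rw [List.pairwise_cons] at hpw
    cases hbp : bLt l r b p with
    | false =>
      have hpb := hout hbp
      subst hpb
      have hst : bStep l r p i = p := by simp [bStep, hle i (by simp)]
      rw [List.foldl_cons, hst]
      exact b_stay l r tl p (fun j hj => hle j (by simp [hj]))
    | true =>
      rcases List.mem_cons.mp (hin hbp) with rfl | hptl
      · have hst : bStep l r b p = p := by simp [bStep, hbp]
        rw [List.foldl_cons, hst]
        exact b_stay l r tl p (fun j hj => hle j (by simp [hj]))
      · have hip' : i < p := hpw.1 p hptl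
        have hilt : bLt l r i p = true := by
          cases h : bLt l r i p with
          | true => rfl
          | false => exact absurd (hmin i (by simp) h) (by omega)
        have hbstep : bStep l r b i = b ∨ bStep l r b i = i := by
          unfold bStep; split_ifs <;> simp
        rw [List.foldl_cons]
        apply ih (bStep l r b i) p (fun j hj => hle j (by simp [hj]))
          (fun j hj h => hmin j (by simp [hj]) h) hpw.2
        · intro _; exact hptl
        · intro hf
          rcases hbstep with h | h
          · rw [h] at hf; exact absurd hbp (by simp [hf])
          · rw [h] at hf; exact absurd hilt (by simp [hf])

-- ---------- A's tie-index list (the 'ind' loop) ----------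
lemma ind_eq (l r : List Int) (n : Int) (hn : n ≤ (l.length : Int)) (mx : Int) :
    (PySem.List.pyRange 0 n 1).foldl
      (fun acc i => if PySem.List.pyGetD ((List.range l.length).map (pvT l r n)) i 0 = mx then acc ++ [i] else acc) ([] : List Int)
    = ((List.range l.length).filter
        (fun i => decide (pvT l r n i = mx ∧ (i : Int) < n))).map (fun i => ((i : Nat) : Int)) := by
  rw [PySem.List.foldl_append_ite_eq_filter, List.nil_append]
  have hr : PySem.List.pyRange 0 n 1 = (List.range n.toNat).map (fun i => ((i : Nat) : Int)) := by
    by_cases h0 : 0 ≤ n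
    · rw [show n = ((n.toNat : Nat) : Int) by omega, PySem.List.pyRange_zero_nat,
          show (((n.toNat : Nat) : Int)).toNat = n.toNat by omega]
    · rw [PySem.List.pyRange_one_eq_nil (by omega), show n.toNat = 0 by omega]
      simp
  have hsplit : (List.range l.length).filter (fun i => decide (pvT l r n i = mx ∧ (i:Int) < n))
      = (List.range n.toNat).filter (fun i => decide (pvT l r n i = mx)) := by
    rw [show l.length = n.toNat + (l.length - n.toNat) by omega, List.range_add, List.filter_append]
    have h2 : ((List.range (l.length - n.toNat)).map (fun i => n.toNat + i)).filter
        (fun i => decide (pvT l r n i = mx ∧ (i:Int) < n)) = [] := by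
      rw [List.filter_eq_nil_iff]
      intro a ha
      simp only [List.mem_map] at ha
      obtain ⟨j, _, rfl⟩ := ha
      simp only [decide_eq_true_eq, not_and]
      intro _; omega
    rw [h2, List.append_nil]
    apply List.filter_congr
    intro i hi
    simp only [List.mem_range] at hi
    have hin : (i:Int) < n := by omega
    simp [hin]
  rw [hsplit, hr, List.filter_map]
  refine congrArg (List.map fun i : Nat => ((i : Nat) : Int)) ?_
  apply List.filter_congr
  intro i hi
  simp only [List.mem_range] at hi
  have hilen : i < l.length := by omega
  simp [Function.comp, PySem.List.pyGetD_natCast, hilen]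

-- the combined filter reduces to a filter over the real products
lemma filter_pvT (l r : List Int) (n : Int) (hn1 : 1 ≤ n) (hnl : n ≤ (l.length : Int)) (v : Int) :
    (List.range l.length).filter (fun i => decide (pvT l r n i = v ∧ (i : Int) < n))
    = (List.range n.toNat).filter (fun i => decide (dP l r i = v)) := by
  rw [show l.length = n.toNat + (l.length - n.toNat) by omega, List.range_add, List.filter_append]
  have h2 : ((List.range (l.length - n.toNat)).map (fun i => n.toNat + i)).filter
      (fun i => decide (pvT l r n i = v ∧ (i:Int) < n)) = [] := by
    rw [List.filter_eq_nil_iff]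
    intro a ha
    simp only [List.mem_map] at ha
    obtain ⟨j, _, rfl⟩ := ha
    simp only [decide_eq_true_eq, not_and]
    intro _; omega
  rw [h2, List.append_nil]
  apply List.filter_congr
  intro i hi
  simp only [List.mem_range] at hi
  have hin : (i:Int) < n := by omega
  simp [pvT, hin]

lemma filter_pvT_dT (l r : List Int) (n : Int) (hn1 : 1 ≤ n) (hnl : n ≤ (l.length : Int)) :
    (List.range l.length).filter (fun i => decide (pvT l r n i = dMx l r n ∧ (i : Int) < n))
    = dT l r n :=
  filter_pvT l r n hn1 hnl _

lemma filter_pvT_zero (l r : List Int) (n : Int) (hn1 : 1 ≤ n) (hnl : n ≤ (l.length : Int))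
    (hneg : dMx l r n < 0) :
    (List.range l.length).filter (fun i => decide (pvT l r n i = 0 ∧ (i : Int) < n)) = [] := by
  rw [filter_pvT l r n hn1 hnl, List.filter_eq_nil_iff]
  intro i hi
  simp only [List.mem_range] at hi
  have : dP l r i ≤ dMx l r n := (dMx_spec l r n hn1).2 _ (by
    simp only [dProds, List.mem_map]; exact ⟨i, by simp [hi]⟩)
  simp only [decide_eq_true_eq]
  omega

-- the tie fold over cast indices is tStep over Nat indices
lemma tie_cast (r : List Int) (F : List Nat) :
    (F.map (fun i => ((i : Nat) : Int))).foldl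
      (fun (p : Int × Int) i =>
        if p.1 < PySem.List.pyGetD r i 0 then (PySem.List.pyGetD r i 0, i) else p)
      ((0:Int), (0:Int))
    = F.foldl (tStep r) ((0:Int), (0:Int)) := by
  rw [List.foldl_map]
  have h : (fun (p : Int × Int) (i : Nat) =>
      if p.1 < PySem.List.pyGetD r ((i : Nat) : Int) 0 then (PySem.List.pyGetD r ((i : Nat) : Int) 0, ((i : Nat) : Int)) else p)
      = tStep r := by
    funext p i
    simp [tStep, PySem.List.pyGetD_natCast]
  rw [h]

-- tie fold over dT: the two possible outcomes
lemma tie_dT_pos (l r : List Int) (n : Int) (hn1 : 1 ≤ n) (hmr : 0 < dMr l r n) :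
    (dT l r n).foldl (tStep r) ((0:Int), (0:Int)) = (dMr l r n, (dPick l r n : Int)) := by
  obtain ⟨hpmem, hpr, hpmin⟩ := dPick_spec l r n hn1
  obtain ⟨-, hmrle⟩ := dMr_spec l r n hn1
  exact t_go r (dT l r n) (0,0) (dMr l r n) (dPick l r n)
    (fun i hi => hmrle _ (List.mem_map.mpr ⟨i, hi, rfl⟩)) hpmem hpr hpmin
    (dT_pairwise l r n) (by simpa using hmr)

lemma tie_dT_nonpos (l r : List Int) (n : Int) (hn1 : 1 ≤ n) (hmr : dMr l r n ≤ 0) :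
    (dT l r n).foldl (tStep r) ((0:Int), (0:Int)) = ((0:Int), (0:Int)) := by
  obtain ⟨-, hmrle⟩ := dMr_spec l r n hn1
  exact t_stay r (dT l r n) (0,0)
    (fun i hi => le_trans (hmrle _ (List.mem_map.mpr ⟨i, hi, rfl⟩)) (by simpa using hmr))

-- ---------- the main characterisation of A ----------
lemma A_main (l r : List Int) (n : Int) (_hne : l ≠ []) (hn1 : 1 ≤ n)
    (hnl : n ≤ (l.length : Int)) :
    evaluate l r n =
      if 0 < dMx l r n ∨ n.toNat = l.length then
        (if (dT l r n).length = 1 ∨ 0 < dMr l r n then (dPick l r n : Int) + 1 else 1)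
      else if dMx l r n = 0 then
        (if 0 < dMr l r n then (dPick l r n : Int) + 1 else 1)
      else if l.length = n.toNat + 1 then (n.toNat : Int) + 1 else 1 := by
  have hN1 : 1 ≤ n.toNat := by omega
  have hNm : n.toNat ≤ l.length := by omega
  obtain ⟨hmxmem, hmxle⟩ := dMx_spec l r n hn1
  have htne := dT_ne l r n hn1
  have hT1le : 0 < (dT l r n).length := List.length_pos_iff.mpr htne
  simp only [evaluate]
  rw [temp_eq l r n hnl]
  have hdec := temp_decomp l r n hn1 hnl
  by_cases hcase : 0 < dMx l r n ∨ n.toNat = l.length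
  · have hmax : PySem.List.max? ((List.range l.length).map (pvT l r n)) (fun x => x)
        = some (dMx l r n) := by
      apply max?_id_eq_of
      · rw [hdec]; exact List.mem_append_left _ hmxmem
      · intro y hy
        rw [hdec] at hy
        rcases List.mem_append.mp hy with h | h
        · exact hmxle y h
        · have h0 : y = 0 := List.eq_of_mem_replicate h
          rcases hcase with hpos | hzm
          · omega
          · exfalso; rw [hzm] at h; simp at h
    have hmaxD : (PySem.List.max? ((List.range l.length).map (pvT l r n)) (fun x => x)).getD 0
        = dMx l r n := by rw [hmax]; rfl
    rw [hmaxD]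
    have hcnt : PySem.List.count ((List.range l.length).map (pvT l r n)) (dMx l r n)
        = (dT l r n).length := by
      rw [PySem.List.count_eq, hdec, List.count_append]
      have h1 : List.count (dMx l r n) (dProds l r n) = (dT l r n).length := by
        show List.count (dMx l r n) ((List.range n.toNat).map (dP l r)) = _
        rw [count_map_range]; rfl
      have h2 : List.count (dMx l r n) (List.replicate (l.length - n.toNat) (0:Int)) = 0 := by
        apply List.count_eq_zero.mpr
        intro hmem
        have h0 : dMx l r n = 0 := List.eq_of_mem_replicate hmem
        rcases hcase with hpos | hzm
        · omega
        · rw [hzm] at hmem; simp at hmem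
      rw [h1, h2]
      omega
    rw [hcnt, if_pos hcase]
    by_cases hTl : (dT l r n).length = 1
    · rw [if_pos hTl, if_pos (Or.inl hTl)]
      obtain ⟨a, ha⟩ := List.length_eq_one_iff.mp hTl
      have hidx : PySem.List.index? ((List.range l.length).map (pvT l r n)) (dMx l r n)
          = some a := by
        rw [hdec, PySem.List.index?_append_of_mem _ hmxmem, PySem.List.index?_eq_idxOf?]
        show List.idxOf? (dMx l r n) ((List.range n.toNat).map (dP l r)) = some a
        rw [idxOf?_map_range]
        show (dT l r n).head? = some a
        rw [ha]; rfl
      rw [hidx]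
      have hpa : dPick l r n = a := by
        obtain ⟨hpmem, -, -⟩ := dPick_spec l r n hn1
        rw [ha] at hpmem; simpa using hpmem
      rw [hpa]
      simp
    · rw [if_neg hTl]
      simp only [ind_eq l r n hnl (dMx l r n), filter_pvT_dT l r n hn1 hnl, tie_cast]
      by_cases hmr : 0 < dMr l r n
      · rw [tie_dT_pos l r n hn1 hmr, if_pos (Or.inr hmr)]
      · rw [tie_dT_nonpos l r n hn1 (by omega),
            if_neg (show ¬((dT l r n).length = 1 ∨ 0 < dMr l r n) from by
              exact not_or.mpr ⟨hTl, by omega⟩)]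
        rfl
  · rw [if_neg hcase]
    have hd0 : dMx l r n ≤ 0 := by
      by_contra h; exact hcase (Or.inl (by omega))
    have hzm : n.toNat < l.length := by
      rcases lt_or_eq_of_le hNm with h | h
      · exact h
      · exact absurd (Or.inr h) hcase
    by_cases h0 : dMx l r n = 0
    · rw [if_pos h0]
      have hmax : PySem.List.max? ((List.range l.length).map (pvT l r n)) (fun x => x)
          = some (dMx l r n) := by
        apply max?_id_eq_of
        · rw [hdec]; exact List.mem_append_left _ hmxmem
        · intro y hy
          rw [hdec] at hy
          rcases List.mem_append.mp hy with h | h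
          · exact hmxle y h
          · have := List.eq_of_mem_replicate h; omega
      have hmaxD : (PySem.List.max? ((List.range l.length).map (pvT l r n)) (fun x => x)).getD 0
          = dMx l r n := by rw [hmax]; rfl
      rw [hmaxD]
      have hcnt : PySem.List.count ((List.range l.length).map (pvT l r n)) (dMx l r n)
          = (dT l r n).length + (l.length - n.toNat) := by
        rw [PySem.List.count_eq, hdec, List.count_append]
        have h1 : List.count (dMx l r n) (dProds l r n) = (dT l r n).length := by
          show List.count (dMx l r n) ((List.range n.toNat).map (dP l r)) = _
          rw [count_map_range]; rfl
        have h2 : List.count (dMx l r n) (List.replicate (l.length - n.toNat) (0:Int))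
            = l.length - n.toNat := by
          rw [h0]; simp
        rw [h1, h2]
      rw [hcnt, if_neg (show ¬((dT l r n).length + (l.length - n.toNat) = 1) from by omega)]
      simp only [ind_eq l r n hnl (dMx l r n), filter_pvT_dT l r n hn1 hnl, tie_cast]
      by_cases hmr : 0 < dMr l r n
      · rw [tie_dT_pos l r n hn1 hmr, if_pos hmr]
      · rw [tie_dT_nonpos l r n hn1 (by omega), if_neg hmr]
        rfl
    · have hneg : dMx l r n < 0 := by omega
      rw [if_neg h0]
      have h0notin : (0:Int) ∉ dProds l r n := by
        intro hmem
        have := hmxle 0 hmem; omega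
      have hmax : PySem.List.max? ((List.range l.length).map (pvT l r n)) (fun x => x)
          = some 0 := by
        apply max?_id_eq_of
        · rw [hdec]
          exact List.mem_append_right _ (List.mem_replicate.mpr ⟨by omega, rfl⟩)
        · intro y hy
          rw [hdec] at hy
          rcases List.mem_append.mp hy with h | h
          · have := hmxle y h; omega
          · exact le_of_eq (List.eq_of_mem_replicate h)
      have hmaxD : (PySem.List.max? ((List.range l.length).map (pvT l r n)) (fun x => x)).getD 0
          = (0:Int) := by rw [hmax]; rfl
      rw [hmaxD]
      have hcnt : PySem.List.count ((List.range l.length).map (pvT l r n)) (0:Int)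
          = l.length - n.toNat := by
        rw [PySem.List.count_eq, hdec, List.count_append]
        have h1 : List.count (0:Int) (dProds l r n) = 0 := List.count_eq_zero.mpr h0notin
        have h2 : List.count (0:Int) (List.replicate (l.length - n.toNat) (0:Int))
            = l.length - n.toNat := by simp
        rw [h1, h2]
        omega
      rw [hcnt]
      by_cases hz1 : l.length = n.toNat + 1
      · rw [if_pos (show l.length - n.toNat = 1 from by omega), if_pos hz1]
        have hrep1 : List.replicate (l.length - n.toNat) (0:Int) = [0] := by
          rw [show l.length - n.toNat = 1 from by omega]; rfl
        have hidx : PySem.List.index? ((List.range l.length).map (pvT l r n)) (0:Int)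
            = some (dProds l r n).length := by
          rw [hdec, hrep1]
          exact PySem.List.index?_append_singleton_self _ _ h0notin
        rw [hidx]
        have hlen : (dProds l r n).length = n.toNat := by simp [dProds]
        rw [hlen]
        simp
      · rw [if_neg (show ¬(l.length - n.toNat = 1) from by omega), if_neg hz1]
        simp only [ind_eq l r n hnl (0:Int), filter_pvT_zero l r n hn1 hnl hneg]
        rfl

-- ---------- A and B on n ≤ 0 ----------
lemma A_zero (l r : List Int) (n : Int) (hne : l ≠ []) (hn0 : n ≤ 0) :
    evaluate l r n = 1 := by
  have hm1 : 1 ≤ l.length := List.length_pos_iff.mpr hne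
  simp only [evaluate]
  rw [PySem.List.pyRange_one_eq_nil (show n ≤ (0:Int) from hn0)]
  simp only [List.foldl_nil]
  have hmap : l.map (fun _ => (0:Int)) = List.replicate l.length 0 := by
    rw [List.eq_replicate_iff]
    refine ⟨by simp, ?_⟩
    intro b hb
    obtain ⟨a, -, h⟩ := List.mem_map.mp hb
    exact h.symm
  rw [hmap]
  have hmax : PySem.List.max? (List.replicate l.length (0:Int)) (fun x => x) = some 0 :=
    max?_id_eq_of (List.replicate l.length (0:Int)) 0 (by simp [List.mem_replicate, hne])
      (fun y hy => le_of_eq (List.eq_of_mem_replicate hy))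
  rw [hmax]
  simp only [Option.getD_some]
  have hcnt : PySem.List.count (List.replicate l.length (0:Int)) 0 = l.length := by
    rw [PySem.List.count_eq]
    simp
  rw [hcnt]
  by_cases hm : l.length = 1
  · rw [if_pos hm, hm]
    rw [show List.replicate 1 (0:Int) = [0] from rfl, PySem.List.index?_cons_self]
    rfl
  · rw [if_neg hm]
    simp

lemma B_zero (l r : List Int) (n : Int) (hn0 : n ≤ 0) :
    evaluate_alt l r n = 1 := by
  simp only [evaluate_alt]
  rw [PySem.List.pyRange_one_eq_nil (by omega)]
  rfl

-- ---------- B computes dPick + 1 ----------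
-- B's Int-level loop body, named
def iStep (l r : List Int) (best i : Int) : Int :=
  if PySem.List.pyGetD l best 0 * PySem.List.pyGetD r best 0 <
       PySem.List.pyGetD l i 0 * PySem.List.pyGetD r i 0
     ∨ (PySem.List.pyGetD l i 0 * PySem.List.pyGetD r i 0 =
          PySem.List.pyGetD l best 0 * PySem.List.pyGetD r best 0
        ∧ PySem.List.pyGetD r best 0 < PySem.List.pyGetD r i 0)
  then i else best

lemma eval_alt_iStep (l r : List Int) (n : Int) :
    evaluate_alt l r n = (PySem.List.pyRange 1 n 1).foldl (iStep l r) 0 + 1 := rfl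

lemma iStep_cast (l r : List Int) (b i : Nat) :
    iStep l r ((b : Nat) : Int) ((i : Nat) : Int) = ((bStep l r b i : Nat) : Int) := by
  simp only [iStep, bStep, bLt, PySem.List.pyGetD_natCast, dP]
  split_ifs with h1 h2 h2 <;> simp_all
  omega

lemma fold_cast (l r : List Int) : ∀ (ks : List Nat) (b : Nat),
    (ks.map (fun k : Nat => ((k : Nat) : Int))).foldl (iStep l r) ((b : Nat) : Int)
    = ((ks.foldl (bStep l r) b : Nat) : Int) := by
  intro ks
  induction ks with
  | nil => intro b; rfl
  | cons k tl ih =>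
    intro b
    rw [List.map_cons, List.foldl_cons, List.foldl_cons, iStep_cast]
    exact ih (bStep l r b k)

lemma bLt_irrefl (l r : List Int) (i : Nat) : bLt l r i i = false := by
  simp [bLt]

lemma B_main (l r : List Int) (n : Int) (hn1 : 1 ≤ n) :
    evaluate_alt l r n = (dPick l r n : Int) + 1 := by
  obtain ⟨hpmem, hpr, hpmin⟩ := dPick_spec l r n hn1
  obtain ⟨hpN, hpdP⟩ := (mem_dT l r n _).mp hpmem
  obtain ⟨-, hmxle⟩ := dMx_spec l r n hn1
  obtain ⟨-, hmrle⟩ := dMr_spec l r n hn1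
  have hdPle : ∀ i, i < n.toNat → dP l r i ≤ dMx l r n := by
    intro i hi
    exact hmxle _ (by simp only [dProds, List.mem_map, List.mem_range]; exact ⟨i, hi, rfl⟩)
  have hkmax : ∀ i, i < n.toNat → bLt l r (dPick l r n) i = false := by
    intro i hi
    rw [bLt, decide_eq_false_iff_not]
    rintro (h | ⟨heq, hlt⟩)
    · have := hdPle i hi; omega
    · have hiT : i ∈ dT l r n := (mem_dT l r n i).mpr ⟨hi, by omega⟩
      have : r.getD i 0 ≤ dMr l r n := hmrle _ (List.mem_map.mpr ⟨i, hiT, rfl⟩)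
      omega
  have hkmin : ∀ i, i < n.toNat → bLt l r i (dPick l r n) = false → dPick l r n ≤ i := by
    intro i hi hf
    obtain ⟨hdp, hrd⟩ := bLt_total l r i (dPick l r n) hf (hkmax i hi)
    have hiT : i ∈ dT l r n := (mem_dT l r n i).mpr ⟨hi, by omega⟩
    exact hpmin i hiT (by omega)
  rw [eval_alt_iStep, PySem.List.pyRange_one]
  have h1 : (fun k : Nat => (1:Int) + (k : Int)) = (fun k : Nat => ((1 + k : Nat) : Int)) := by
    funext k; push_cast; ring
  have h2 : (List.range (n-1).toNat).map (fun k : Nat => ((1 + k : Nat) : Int))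
      = ((List.range (n-1).toNat).map (fun k => 1 + k)).map (fun i : Nat => ((i : Nat) : Int)) := by
    rw [List.map_map]; rfl
  rw [h1, h2, show ((0:Int)) = ((0:Nat):Int) from rfl, fold_cast]
  have hmem : ∀ i, i ∈ (List.range (n-1).toNat).map (fun k => 1 + k) ↔ 1 ≤ i ∧ i < n.toNat := by
    intro i
    simp only [List.mem_map, List.mem_range]
    constructor
    · rintro ⟨k, hk, rfl⟩; omega
    · rintro ⟨h1', h2'⟩; exact ⟨i - 1, by omega, by omega⟩
  have hrun : ((List.range (n-1).toNat).map (fun k => 1 + k)).foldl (bStep l r) 0 = dPick l r n := by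
    apply b_go l r _ 0 (dPick l r n)
    · intro i hi; exact hkmax i ((hmem i).mp hi).2
    · intro i hi hf; exact hkmin i ((hmem i).mp hi).2 hf
    · exact (List.pairwise_lt_range).map _ (by intro a b h; omega)
    · intro hlt
      have hp0 : dPick l r n ≠ 0 := by
        intro h0; rw [h0] at hlt
        rw [bLt_irrefl] at hlt; exact Bool.false_ne_true hlt
      exact (hmem _).mpr ⟨by omega, hpN⟩
    · intro hf
      have h0N : 0 < n.toNat := by omega
      obtain ⟨hdp, hrd⟩ := bLt_total l r 0 (dPick l r n) hf (hkmax 0 h0N)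
      have h0T : (0:Nat) ∈ dT l r n := (mem_dT l r n 0).mpr ⟨h0N, by omega⟩
      have := hpmin 0 h0T (by omega)
      omega
  rw [hrun]


-- ===== VERDICT (by name: the statement is the Claim_ definition above) =====
theorem evaluate_spec : Claim_equal_evaluate := by
  intro l r n _ hpre
  obtain ⟨hne, hdom⟩ := hpre
  show evaluate l r n = evaluate_alt l r n
  by_cases hn1 : 1 ≤ n
  · obtain ⟨hnl, hnr, hD⟩ :
        n ≤ (l.length : Int) ∧ n ≤ (r.length : Int) ∧
        ¬ ((n < (l.length : Int) ∧ dMx l r n < 0 ∧ ((l.length : Int) = n + 1 ∨ dPick l r n ≠ 0))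
           ∨ (n < (l.length : Int) ∧ dMx l r n = 0 ∧ dMr l r n ≤ 0 ∧ dPick l r n ≠ 0)
           ∨ (((l.length : Int) ≤ n ∨ 0 < dMx l r n) ∧ 2 ≤ (dT l r n).length
              ∧ dMr l r n ≤ 0 ∧ dPick l r n ≠ 0)) := by
      rcases hdom with h | h
      · omega
      · exact h
    have hT1le : 0 < (dT l r n).length := List.length_pos_iff.mpr (dT_ne l r n hn1)
    rw [A_main l r n hne hn1 hnl, B_main l r n hn1]
    split_ifs with hA hB1 hC hD' hE
    · rfl
    · have hp0 : dPick l r n = 0 := by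
        by_contra hp
        apply hD
        refine Or.inr (Or.inr ⟨?_, by omega, by omega, hp⟩)
        rcases hA with h | h
        · exact Or.inr h
        · exact Or.inl (by omega)
      rw [hp0]; rfl
    · rfl
    · have hp0 : dPick l r n = 0 := by
        by_contra hp
        exact hD (Or.inr (Or.inl ⟨by omega, hC, by omega, hp⟩))
      rw [hp0]; rfl
    · exfalso
      apply hD
      exact Or.inl ⟨by omega, by omega, Or.inl (by omega)⟩
    · have hp0 : dPick l r n = 0 := by
        by_contra hp
        exact hD (Or.inl ⟨by omega, by omega, Or.inr hp⟩)
      rw [hp0]; rfl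
  · rw [A_zero l r n hne (by omega), B_zero l r n (by omega)]
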